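-- pv_equiv track=rewrite | github.com/iamakkkhil/DailyCoding | Day_43.py | posOfRightMostDiffBit
-- ===== SOURCE A (Python) =====
-- def posOfRightMostDiffBit(m,n):
--     m = m^n
--
--     count = 1
--     while m:
--         if m & 1 == 1:
--             return count
--
--         m = m>>1
--         count+=1
-- ===== SOURCE B (Python) =====
-- def posOfRightMostDiffBit(m, n):
--     x = m ^ n
--     if x == 0:
--         return None
--     return (x & -x).bit_length()
-- ===== Notes on version B (the rewrite author's own statement) =====
-- stated objective: simpler
-- what changed: Replaces the bit-by-bit scanning loop with a closed-form expression: isolate the lowest set bit of m^n with x & -x and return its bit_length (None when m == n).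
import Mathlib
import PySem

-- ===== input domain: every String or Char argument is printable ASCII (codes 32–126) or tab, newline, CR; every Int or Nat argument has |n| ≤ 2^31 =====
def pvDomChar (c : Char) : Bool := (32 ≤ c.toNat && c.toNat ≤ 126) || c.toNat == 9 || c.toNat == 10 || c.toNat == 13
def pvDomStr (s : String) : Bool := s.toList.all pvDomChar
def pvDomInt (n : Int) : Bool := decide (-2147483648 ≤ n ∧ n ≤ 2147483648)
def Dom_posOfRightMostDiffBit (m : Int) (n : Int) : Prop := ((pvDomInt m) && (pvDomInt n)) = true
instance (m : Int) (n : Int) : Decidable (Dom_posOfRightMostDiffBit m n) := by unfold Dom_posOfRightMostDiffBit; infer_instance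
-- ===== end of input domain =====

-- B replaces A's bit-by-bit scanning loop with the closed form (x & -x).bit_length() on x = m ^ n; objective: simpler.

-- ===== PORT A =====
-- A's while-loop: 'while m: if m & 1 == 1: return count; m = m >> 1; count += 1'.
-- The fuel (64) is a totality guard only: on the domain |m|,|n| ≤ 2^31 the xor has
-- natAbs ≤ 2^32, so the loop always returns within 64 iterations (proved below).
def pvLoopA : Nat → Int → Int → Option Int
  | 0, _, _ => none
  | fuel + 1, m, count =>
    if m ≠ 0 then
      if PySem.Int.band m 1 = 1 then some count
      else pvLoopA fuel (m >>> (1 : Nat)) (count + 1)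
    else none

def posOfRightMostDiffBit (m : Int) (n : Int) : Option Int :=
  pvLoopA 64 (PySem.Int.bxor m n) 1

-- ===== PORT B =====
def posOfRightMostDiffBit_alt (m : Int) (n : Int) : Option Int :=
  let x := PySem.Int.bxor m n
  if x = 0 then none
  else some ((PySem.Int.bitLength (PySem.Int.band x (-x)) : Int))

-- ===== PRECONDITION & SPEC =====
def Spec_posOfRightMostDiffBit (m : Int) (n : Int) (out : Option Int) : Prop := out = posOfRightMostDiffBit_alt m n
instance (m : Int) (n : Int) (out : Option Int) : Decidable (Spec_posOfRightMostDiffBit m n out) := by unfold Spec_posOfRightMostDiffBit; infer_instance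

-- ===== CLAIM (what is proved, stated in full; the proofs are below) =====
def Claim_equal_posOfRightMostDiffBit : Prop := ∀ (m : Int) (n : Int), Dom_posOfRightMostDiffBit m n → Spec_posOfRightMostDiffBit m n (posOfRightMostDiffBit m n)

-- ===== LEMMAS AND PROOFS =====

-- lowest set bit of a positive Nat, written as n - (n &&& (n-1))
def pvLowbit (n : Nat) : Nat := n - (n &&& (n - 1))

theorem pvLand_pred_odd (k : Nat) : (2 * k + 1) &&& (2 * k) = 2 * k := by
  apply Nat.eq_of_testBit_eq
  intro i
  cases i with
  | zero => rw [Nat.testBit_land]; simp [Nat.testBit_zero, Nat.mul_mod_right]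
  | succ j =>
      have h1 : (2 * k + 1) / 2 = k := by omega
      have h2 : (2 * k) / 2 = k := by omega
      rw [Nat.testBit_land]
      simp only [Nat.testBit_succ, h1, h2]
      cases Nat.testBit k j <;> simp

theorem pvLand_pred_even (k : Nat) (hk : 0 < k) :
    (2 * k) &&& (2 * k - 1) = 2 * (k &&& (k - 1)) := by
  apply Nat.eq_of_testBit_eq
  intro i
  cases i with
  | zero =>
      rw [Nat.testBit_land]
      simp [Nat.testBit_zero, Nat.mul_mod_right]
  | succ j =>
      have h1 : (2 * k) / 2 = k := by omega
      have h2 : (2 * k - 1) / 2 = k - 1 := by omega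
      have h3 : (2 * (k &&& (k - 1))) / 2 = k &&& (k - 1) := by omega
      rw [Nat.testBit_land]
      simp only [Nat.testBit_succ, h1, h2, h3]
      rw [Nat.testBit_land]

theorem pvLowbit_odd (n : Nat) (h : n % 2 = 1) : pvLowbit n = 1 := by
  obtain ⟨k, rfl⟩ : ∃ k, n = 2 * k + 1 := ⟨n / 2, by omega⟩
  unfold pvLowbit
  have : (2 * k + 1) - 1 = 2 * k := by omega
  rw [this, pvLand_pred_odd]
  omega

theorem pvLowbit_even (n : Nat) (h : n % 2 = 0) (hn : 0 < n) :
    pvLowbit n = 2 * pvLowbit (n / 2) := by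
  obtain ⟨k, rfl⟩ : ∃ k, n = 2 * k := ⟨n / 2, by omega⟩
  have hk : 0 < k := by omega
  unfold pvLowbit
  rw [pvLand_pred_even k hk]
  have hle : k &&& (k - 1) ≤ k - 1 := le_trans (Nat.and_le_right) (le_refl _)
  have h2 : (2 * k) / 2 = k := by omega
  rw [h2]
  omega

theorem pvLowbit_pos (n : Nat) (hn : 0 < n) : 0 < pvLowbit n := by
  unfold pvLowbit
  have : n &&& (n - 1) ≤ n - 1 := Nat.and_le_right
  omega

-- x & -x seen through natAbs
theorem pvBand_neg_self (x : Int) (hx : x ≠ 0) :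
    PySem.Int.band x (-x) = ((pvLowbit x.natAbs : Nat) : Int) := by
  rw [PySem.Int.band.eq_1]
  unfold pvLowbit
  rcases lt_or_gt_of_ne hx with hneg | hpos
  · have h1 : ¬ (0 ≤ x) := by omega
    have h2 : (0 : Int) ≤ -x := by omega
    simp only [h1, h2, if_false, if_true]
    have e1 : (-x).toNat = x.natAbs := by omega
    have e2 : (-x - 1).toNat = x.natAbs - 1 := by omega
    rw [e1, e2]
  · have h1 : (0 : Int) ≤ x := by omega
    have h2 : ¬ ((0 : Int) ≤ -x) := by omega
    simp only [h1, h2, if_true, if_false]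
    have e1 : x.toNat = x.natAbs := by omega
    have e2 : (-(-x) - 1).toNat = x.natAbs - 1 := by omega
    rw [e1, e2]

theorem pvMod2_eq_one (x : Int) (h : x.natAbs % 2 = 1) : PySem.Int.mod x 2 = 1 := by
  have h0 : (0 : Int) ≤ PySem.Int.mod x 2 := PySem.Int.mod_nonneg x (by norm_num)
  have h1 : PySem.Int.mod x 2 < 2 := PySem.Int.mod_lt x (by norm_num)
  have h2 : ¬ ((2 : Int) ∣ x) := by omega
  have h3 : PySem.Int.mod x 2 ≠ 0 := by
    intro hc; exact h2 ((PySem.Int.mod_eq_zero_iff_dvd x 2).mp hc)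
  omega

theorem pvMod2_eq_zero (x : Int) (h : x.natAbs % 2 = 0) : PySem.Int.mod x 2 = 0 := by
  exact (PySem.Int.mod_eq_zero_iff_dvd x 2).mpr (by omega)

theorem pvShiftOne (y : Int) : (2 * y) >>> (1 : Nat) = y := by
  rw [Int.shiftRight_eq_div_pow]
  norm_num

-- the loop computes count - 1 + bit_length(lowbit)
theorem pvLoopA_eq (n : Nat) : 0 < n → ∀ (fuel : Nat) (x count : Int),
    x.natAbs = n → n < 2 ^ fuel →
    pvLoopA fuel x count = some (count + (PySem.Int.bitLength ((pvLowbit n : Nat) : Int) : Int) - 1) := by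
  induction n using Nat.strong_induction_on with
  | _ n ih =>
    intro hn fuel x count hAbs hfuel
    match fuel with
    | 0 => exfalso; simp at hfuel; omega
    | f + 1 =>
      have hx : x ≠ 0 := by intro h; rw [h] at hAbs; simp at hAbs; omega
      unfold pvLoopA
      rw [if_pos hx, PySem.Int.band_one]
      by_cases hpar : n % 2 = 1
      · rw [if_pos (by rw [← hAbs] at hpar; exact pvMod2_eq_one x hpar)]
        rw [pvLowbit_odd n hpar]
        have h1 : PySem.Int.bitLength ((1 : Nat) : Int) = 1 := by decide
        rw [h1]
        congr 1
        push_cast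
        omega
      · have hpar0 : n % 2 = 0 := by omega
        have hmod : PySem.Int.mod x 2 = 0 := pvMod2_eq_zero x (by omega)
        rw [if_neg (by rw [hmod]; norm_num)]
        obtain ⟨y, rfl⟩ : ∃ y, x = 2 * y := by
          have : (2 : Int) ∣ x := by omega
          exact ⟨x / 2, by omega⟩
        rw [pvShiftOne]
        have hyAbs : y.natAbs = n / 2 := by omega
        have hyPos : 0 < n / 2 := by omega
        have hlt : n / 2 < n := by omega
        have hf : n / 2 < 2 ^ f := by
          have : 2 ^ (f + 1) = 2 * 2 ^ f := by ring
          omega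
        rw [ih (n / 2) hlt hyPos f y (count + 1) hyAbs hf]
        rw [pvLowbit_even n hpar0 hn]
        have hbl : PySem.Int.bitLength ((2 * pvLowbit (n / 2) : Nat) : Int)
            = PySem.Int.bitLength ((pvLowbit (n / 2) : Nat) : Int) + 1 := by
          have hp : 0 < 2 * pvLowbit (n / 2) := by
            have := pvLowbit_pos (n / 2) hyPos; omega
          have := PySem.Int.bitLength_natCast hp
          rw [this]
          congr 2
          omega
        rw [hbl]
        congr 1
        push_cast
        omega

-- xor of domain-sized ints is bounded
theorem pvBxor_bound (m n : Int) (hm : m.natAbs ≤ 2 ^ 31) (hn : n.natAbs ≤ 2 ^ 31) :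
    (PySem.Int.bxor m n).natAbs ≤ 2 ^ 32 := by
  rw [PySem.Int.bxor.eq_1]
  have key : ∀ a b : Nat, a < 2 ^ 32 → b < 2 ^ 32 → (a ^^^ b) < 2 ^ 32 := by
    intro a b ha hb; exact Nat.xor_lt_two_pow ha hb
  split_ifs with h1 h2 h3
  · have := key m.toNat n.toNat (by omega) (by omega); omega
  · have := key m.toNat (-n - 1).toNat (by omega) (by omega); omega
  · have := key (-m - 1).toNat n.toNat (by omega) (by omega); omega
  · have := key (-m - 1).toNat (-n - 1).toNat (by omega) (by omega); omega

-- ===== VERDICT (by name: the statement is the Claim_ definition above) =====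
theorem posOfRightMostDiffBit_spec : Claim_equal_posOfRightMostDiffBit := by
  intro m n hDom
  unfold Spec_posOfRightMostDiffBit posOfRightMostDiffBit posOfRightMostDiffBit_alt
  have hDom' : m.natAbs ≤ 2 ^ 31 ∧ n.natAbs ≤ 2 ^ 31 := by
    unfold Dom_posOfRightMostDiffBit pvDomInt at hDom
    simp at hDom
    omega
  set x := PySem.Int.bxor m n with hxdef
  by_cases hx : x = 0
  · rw [hx]
    simp [pvLoopA]
  · rw [if_neg hx]
    have hb := pvBxor_bound m n hDom'.1 hDom'.2
    rw [← hxdef] at hb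
    have habs : 0 < x.natAbs := by omega
    have hlt : x.natAbs < 2 ^ 64 := by
      have : (2 : Nat) ^ 32 < 2 ^ 64 := by norm_num
      omega
    rw [pvLoopA_eq x.natAbs habs 64 x 1 rfl hlt]
    rw [pvBand_neg_self x hx]
    congr 1
    omega
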